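-- pv_equiv track=rewrite | github.com/Tianyi-Billy-Ma/N-MARS | src/n_mars/scripts/inference_cost.py | apply_stack_postprocess
-- ===== SOURCE A (Python) =====
-- def apply_stack_postprocess(token_ids: list[int], undo_id: int) -> list[int]:
--     """Simulate UNDO stack: push normal tokens, pop on UNDO token.
--
--     Returns the final stack contents (tokens that survive post-processing).
--     """
--     stack: list[int] = []
--     for tok in token_ids:
--         if tok == undo_id:
--             if stack:
--                 stack.pop()
--         else:
--             stack.append(tok)
--     return stack
-- ===== SOURCE B (Python) =====
-- def apply_stack_postprocess(token_ids: list[int], undo_id: int) -> list[int]: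
--     """Reverse scan: count unmatched later UNDOs; a normal token survives iff no
--     pending UNDO cancels it. Survivors collected back-to-front, then reversed."""
--     pending = 0
--     result: list[int] = []
--     for tok in reversed(token_ids):
--         if tok == undo_id:
--             pending += 1
--         elif pending > 0:
--             pending -= 1
--         else:
--             result.append(tok)
--     result.reverse()
--     return result
-- ===== Notes on version B (the rewrite author's own statement) =====
-- stated objective: alternative
-- what changed: Replaces the forward stack simulation (append/pop on a list) with a single reverse scan keeping only an integer count of pending UNDOs and collecting surviving tokens, no stack is ever materialised.
import Mathlib
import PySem

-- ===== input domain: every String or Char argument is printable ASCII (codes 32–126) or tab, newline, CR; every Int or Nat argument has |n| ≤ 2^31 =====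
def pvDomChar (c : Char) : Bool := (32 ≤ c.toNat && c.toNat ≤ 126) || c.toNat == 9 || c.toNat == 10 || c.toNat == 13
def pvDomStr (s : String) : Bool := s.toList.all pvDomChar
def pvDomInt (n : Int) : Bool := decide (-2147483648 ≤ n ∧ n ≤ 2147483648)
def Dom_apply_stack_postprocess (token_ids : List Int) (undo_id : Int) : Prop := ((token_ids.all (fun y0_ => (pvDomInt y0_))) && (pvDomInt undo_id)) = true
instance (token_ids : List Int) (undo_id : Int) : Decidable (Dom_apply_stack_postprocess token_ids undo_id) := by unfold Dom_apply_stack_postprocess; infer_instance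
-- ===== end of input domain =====

-- ===== PORT A =====
-- B replaces A's forward stack simulation by a reverse scan with an integer pending-UNDO counter (objective: alternative; same cost).
def apply_stack_postprocess (token_ids : List Int) (undo_id : Int) : List Int :=
  token_ids.foldl
    (fun stack tok =>
      if tok == undo_id then
        (if stack.isEmpty then stack else stack.dropLast)  -- `if stack: stack.pop()`
      else stack ++ [tok])
    []

-- ===== PORT B =====
def apply_stack_postprocess_alt (token_ids : List Int) (undo_id : Int) : List Int :=
  let st := token_ids.reverse.foldl
    (fun (st : Int × List Int) tok =>
      if tok == undo_id then (st.1 + 1, st.2)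
      else if st.1 > 0 then (st.1 - 1, st.2)
      else (st.1, st.2 ++ [tok]))
    (0, [])
  st.2.reverse

-- ===== PRECONDITION & SPEC =====
def Spec_apply_stack_postprocess (token_ids : List Int) (undo_id : Int) (out : List Int) : Prop := out = apply_stack_postprocess_alt token_ids undo_id
instance (token_ids : List Int) (undo_id : Int) (out : List Int) : Decidable (Spec_apply_stack_postprocess token_ids undo_id out) := by unfold Spec_apply_stack_postprocess; infer_instance

-- ===== CLAIM (what is proved, stated in full; the proofs are below) =====
def Claim_equal_apply_stack_postprocess : Prop := ∀ (token_ids : List Int) (undo_id : Int), Dom_apply_stack_postprocess token_ids undo_id → Spec_apply_stack_postprocess token_ids undo_id (apply_stack_postprocess token_ids undo_id)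

-- ===== LEMMAS AND PROOFS =====

-- the reverse-scan state as a foldr (foldl over the reversed list)
def bscan (u : Int) (l : List Int) : Int × List Int :=
  l.foldr
    (fun tok st =>
      if tok == u then (st.1 + 1, st.2)
      else if st.1 > 0 then (st.1 - 1, st.2)
      else (st.1, st.2 ++ [tok]))
    (0, [])

theorem alt_eq_bscan (l : List Int) (u : Int) :
    apply_stack_postprocess_alt l u = (bscan u l).2.reverse := by
  simp [apply_stack_postprocess_alt, bscan, List.foldl_reverse]

theorem bscan_cons (u tok : Int) (l : List Int) :
    bscan u (tok :: l) =
      if tok == u then ((bscan u l).1 + 1, (bscan u l).2)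
      else if (bscan u l).1 > 0 then ((bscan u l).1 - 1, (bscan u l).2)
      else ((bscan u l).1, (bscan u l).2 ++ [tok]) := rfl

theorem main_inv (u : Int) (l : List Int) : ∀ s : List Int,
    (List.foldl
      (fun stack tok =>
        if tok == u then (if stack.isEmpty then stack else stack.dropLast)
        else stack ++ [tok]) s l
      = s.take (s.length - (bscan u l).1.toNat) ++ (bscan u l).2.reverse)
    ∧ 0 ≤ (bscan u l).1 := by
  induction l with
  | nil => intro s; simp [bscan]
  | cons tok l ih =>
    intro s
    have hp : 0 ≤ (bscan u l).1 := (ih []).2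
    rw [List.foldl_cons, bscan_cons]
    by_cases h : tok = u
    · simp only [h, beq_self_eq_true, if_true]
      refine ⟨?_, by omega⟩
      have ht1 : ((bscan u l).1 + 1).toNat = (bscan u l).1.toNat + 1 := by omega
      rcases List.eq_nil_or_concat s with rfl | ⟨s', a, rfl⟩
      · have := (ih []).1
        simpa using this
      · have hne : ((s' ++ [a]).isEmpty) = false := by simp
        simp only [List.concat_eq_append]
        rw [hne]
        simp only [Bool.false_eq_true, if_false, List.dropLast_concat]
        have := (ih s').1
        rw [this, ht1]
        have hk : s'.length + 1 - ((bscan u l).1.toNat + 1) ≤ s'.length := by omega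
        rw [List.length_append, List.length_cons, List.length_nil,
            List.take_append_of_le_length (by omega : s'.length + 0 + 1 - ((bscan u l).1.toNat + 1) ≤ s'.length)]
        congr 2
        omega
    · have hb : (tok == u) = false := by simp [h]
      simp only [hb, Bool.false_eq_true, if_false]
      by_cases hpos : (bscan u l).1 > 0
      · rw [if_pos hpos]
        refine ⟨?_, by simp; omega⟩
        have := (ih (s ++ [tok])).1
        rw [this]
        have ht1 : ((bscan u l).1 - 1).toNat = (bscan u l).1.toNat - 1 := by omega
        rw [List.length_append, List.length_cons, List.length_nil, ht1,
            List.take_append_of_le_length (by omega : s.length + 0 + 1 - (bscan u l).1.toNat ≤ s.length)]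
        simp only []
        congr 2
        omega
      · rw [if_neg hpos]
        refine ⟨?_, by simp; omega⟩
        have h0 : (bscan u l).1 = 0 := by omega
        have := (ih (s ++ [tok])).1
        rw [this, h0]
        simp only [Int.toNat_zero, Nat.sub_zero, List.length_append, List.length_cons, List.length_nil]
        rw [List.take_of_length_le (by simp)]
        simp

-- ===== VERDICT (by name: the statement is the Claim_ definition above) =====
theorem apply_stack_postprocess_spec : Claim_equal_apply_stack_postprocess := by
  intro l u _
  show apply_stack_postprocess l u = apply_stack_postprocess_alt l u
  rw [alt_eq_bscan]
  have := (main_inv u l []).1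
  simpa [apply_stack_postprocess] using this
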